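-- pv_equiv track=rewrite | github.com/MrBrantCode/unitest_baseline | mut_generate/mist_train_cf/cf_22521/solution.py | count_o_outside_quotes
-- ===== SOURCE A (Python) =====
-- def count_o_outside_quotes(s):
--     count = 0
--     in_quote = False
--     for char in s:
--         if char == '"':
--             in_quote = not in_quote
--         elif char.lower() == 'o' and not in_quote:
--             count += 1
--     return count
-- ===== SOURCE B (Python) =====
-- def count_o_outside_quotes(s):
--     total = 0
--     for i, seg in enumerate(s.split('"')):
--         if i % 2 == 0:
--             total += seg.count('o') + seg.count('O')
--     return total
-- ===== Notes on version B (the rewrite author's own statement) =====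
-- stated objective: faster
-- what changed: Replaces A's per-character toggle-flag Python loop with splitting on the double-quote character and summing the str.count results for both cases of the target letter over the even-indexed (outside-quotes) segments, moving the work into C-level string primitives.
import Mathlib
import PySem

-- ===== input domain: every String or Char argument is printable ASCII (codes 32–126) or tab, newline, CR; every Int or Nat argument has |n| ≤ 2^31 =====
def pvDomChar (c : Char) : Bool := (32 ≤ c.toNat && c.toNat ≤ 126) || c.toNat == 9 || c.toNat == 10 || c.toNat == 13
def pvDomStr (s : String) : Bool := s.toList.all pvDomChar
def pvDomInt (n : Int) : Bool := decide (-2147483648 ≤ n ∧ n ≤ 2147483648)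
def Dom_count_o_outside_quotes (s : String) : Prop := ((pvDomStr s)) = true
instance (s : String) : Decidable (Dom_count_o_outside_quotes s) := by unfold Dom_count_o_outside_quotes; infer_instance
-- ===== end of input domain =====

-- B replaces A's per-character toggle-flag scan by splitting on the double-quote
-- character and summing both-case letter-o counts of the even-indexed (outside-quotes)
-- segments; measured faster (C-level split/count instead of a Python-level loop).

-- ===== PORT A =====
def count_o_outside_quotes (s : String) : Int :=
  (s.toList.foldl
    (fun (st : Int × Bool) c =>
      if c == '"' then (st.1, !st.2)
      else if PySem.Chars.lowerChar c == 'o' && !st.2 then (st.1 + 1, st.2)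
      else st)
    ((0 : Int), false)).1

-- ===== PORT B =====
def count_o_outside_quotes_alt (s : String) : Int :=
  let parts := (PySem.Str.split? s "\"").getD []   -- sep "\"" is nonempty, so split? is always some
  (PySem.List.enumerate parts).foldl
    (fun (total : Int) (p : Int × String) =>
      if PySem.Int.mod p.1 2 == 0 then
        total + (PySem.Str.count p.2 "o" : Int) + (PySem.Str.count p.2 "O" : Int)
      else total)
    0

-- ===== PRECONDITION & SPEC =====
def Spec_count_o_outside_quotes (s : String) (out : Int) : Prop := out = count_o_outside_quotes_alt s
instance (s : String) (out : Int) : Decidable (Spec_count_o_outside_quotes s out) := by unfold Spec_count_o_outside_quotes; infer_instance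

-- ===== CLAIM (what is proved, stated in full; the proofs are below) =====
def Claim_equal_count_o_outside_quotes : Prop := ∀ (s : String), Dom_count_o_outside_quotes s → Spec_count_o_outside_quotes s (count_o_outside_quotes s)

-- ===== LEMMAS AND PROOFS =====

-- per-character 'o'/'O' contribution
def pvOC (c : Char) : Int := if c = 'o' ∨ c = 'O' then 1 else 0

-- A's remaining count when the current in_quote state is q
def pvOutIn (q : Bool) : List Char → Int
  | [] => 0
  | c :: r => if c = '"' then pvOutIn (!q) r
              else (if q then 0 else pvOC c) + pvOutIn q r

-- splitting on '"' with an accumulated (reversed) current segment, as splitOn.go keeps it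
def pvSplit (cur : List Char) : List Char → List (List Char)
  | [] => [cur.reverse]
  | c :: r => if c = '"' then cur.reverse :: pvSplit [] r else pvSplit (c :: cur) r

def pvCnt (cs : List Char) : Int := (cs.count 'o' : Int) + (cs.count 'O' : Int)

-- alternating sum of segment counts; e = current index is even (i.e. outside quotes)
def pvAltSum (e : Bool) : List (List Char) → Int
  | [] => 0
  | p :: r => (if e then pvCnt p else 0) + pvAltSum (!e) r

theorem pvChar_toNat_inj {a b : Char} (h : a.toNat = b.toNat) : a = b := by
  have := congrArg Char.ofNat h
  rwa [Char.ofNat_toNat, Char.ofNat_toNat] at this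

theorem pvLowerChar_o (c : Char) :
    (PySem.Chars.lowerChar c == 'o') = decide (c = 'o' ∨ c = 'O') := by
  simp only [PySem.Chars.lowerChar, PySem.Chars.isupper]
  by_cases hup : ('A' ≤ c ∧ c ≤ 'Z')
  · obtain ⟨h1, h2⟩ := hup
    simp only [h1, h2, decide_true, Bool.and_self, if_true]
    rw [Char.le_def] at h1 h2
    have h1' : 65 ≤ c.toNat := UInt32.le_iff_toNat_le.mp h1
    have h2' : c.toNat ≤ 90 := UInt32.le_iff_toNat_le.mp h2
    have hvalid : (c.toNat + 32).isValidChar := Or.inl (by omega)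
    by_cases hO : c = 'O'
    · subst hO; decide
    · have hne : Char.ofNat (c.toNat + 32) ≠ 'o' := by
        intro h
        have := congrArg Char.toNat h
        rw [Char.toNat_ofNat, if_pos hvalid] at this
        have ho' : ('o' : Char).toNat = 111 := by decide
        have hOt : ('O' : Char).toNat = 79 := by decide
        exact hO (pvChar_toNat_inj (by omega))
      have hno : ¬ (c = 'o' ∨ c = 'O') := by
        rintro (h | h)
        · subst h; exact absurd h2' (by decide)
        · exact hO h
      simp [hne, hno]
  · have hflag : (decide ('A' ≤ c) && decide (c ≤ 'Z')) = false := by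
      rcases not_and_or.mp hup with h | h <;> simp [h]
    simp only [hflag, Bool.false_eq_true, if_false]
    by_cases ho : c = 'o'
    · subst ho; decide
    · have hO : c ≠ 'O' := by
        intro h; subst h; exact hup ⟨by decide, by decide⟩
      simp [ho, hO]

def pvStepA (st : Int × Bool) (c : Char) : Int × Bool :=
  if c == '"' then (st.1, !st.2)
  else if PySem.Chars.lowerChar c == 'o' && !st.2 then (st.1 + 1, st.2)
  else st

theorem pvFoldA (l : List Char) : ∀ (n : Int) (q : Bool),
    (l.foldl pvStepA (n, q)).1 = n + pvOutIn q l := by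
  induction l with
  | nil => intro n q; simp [pvOutIn]
  | cons c r ih =>
    intro n q
    rw [List.foldl_cons]
    by_cases hc : c = '"'
    · subst hc
      have hs : pvStepA (n, q) '"' = (n, !q) := by simp [pvStepA]
      rw [hs, ih]
      simp [pvOutIn]
    · by_cases ho : c = 'o' ∨ c = 'O'
      · cases q with
        | false =>
          have hs : pvStepA (n, false) c = (n + 1, false) := by
            simp [pvStepA, hc, pvLowerChar_o, ho]
          rw [hs, ih]
          simp [pvOutIn, hc, ho, pvOC]
          ring
        | true =>
          have hs : pvStepA (n, true) c = (n, true) := by simp [pvStepA, hc]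
          rw [hs, ih]
          simp [pvOutIn, hc]
      · have hs : pvStepA (n, q) c = (n, q) := by
          simp [pvStepA, hc, pvLowerChar_o, ho]
        rw [hs, ih]
        cases q <;> simp [pvOutIn, hc, ho, pvOC]

theorem pvSplitGo (l : List Char) : ∀ (fuel : Nat) (cur : List Char) (acc : List (List Char)),
    l.length ≤ fuel →
    PySem.Chars.splitOn.go ['"'] fuel l cur acc = acc.reverse ++ pvSplit cur l := by
  induction l with
  | nil =>
    intro fuel cur acc _
    cases fuel <;> simp [PySem.Chars.splitOn.go, pvSplit]
  | cons c r ih =>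
    intro fuel cur acc h
    cases fuel with
    | zero => simp at h
    | succ f =>
      simp only [List.length_cons] at h
      by_cases hc : c = '"'
      · subst hc
        rw [PySem.Chars.splitOn.go]
        simp only [List.isPrefixOf, beq_self_eq_true, Bool.true_and,
          if_true, List.length_singleton, List.drop_one, List.tail_cons]
        rw [ih f [] (cur.reverse :: acc) (by omega)]
        simp [pvSplit]
      · rw [PySem.Chars.splitOn.go]
        have hpre : (['"'].isPrefixOf (c :: r)) = false := by
          simp [List.isPrefixOf, Ne.symm hc]
        rw [hpre]
        simp only [Bool.false_eq_true, if_false]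
        rw [ih f (c :: cur) acc (by omega)]
        simp [pvSplit, hc]

theorem pvCountGo (l : List Char) : ∀ (fuel : Nat) (acc : Nat) (ch : Char),
    l.length ≤ fuel →
    PySem.Chars.count.go [ch] fuel l acc = acc + l.count ch := by
  induction l with
  | nil => intro fuel acc ch _; cases fuel <;> simp [PySem.Chars.count.go]
  | cons c r ih =>
    intro fuel acc ch h
    cases fuel with
    | zero => simp at h
    | succ f =>
      simp only [List.length_cons] at h
      rw [PySem.Chars.count.go]
      by_cases hc : ch = c
      · subst hc
        simp only [List.isPrefixOf, beq_self_eq_true, Bool.true_and,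
          if_true, List.length_singleton, List.drop_one, List.tail_cons]
        rw [ih f (acc + 1) ch (by omega)]
        simp only [List.count_cons, beq_self_eq_true, if_true]
        omega
      · have hpre : ([ch].isPrefixOf (c :: r)) = false := by simp [List.isPrefixOf, hc]
        rw [hpre]
        simp only [Bool.false_eq_true, if_false]
        rw [ih f acc ch (by omega)]
        simp only [List.count_cons]
        simp [Ne.symm hc]

theorem pvStrCountChar (p : String) (ch : Char) :
    PySem.Str.count p (String.ofList [ch]) = p.toList.count ch := by
  rw [PySem.Str.count_eq]
  have h : (String.ofList [ch]).toList = [ch] := by simp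
  rw [h]
  unfold PySem.Chars.count
  simp only [List.isEmpty_cons, Bool.false_eq_true, if_false]
  rw [pvCountGo _ _ _ _ (le_refl _)]
  omega

theorem pvParity (k : Int) : (PySem.Int.mod (k + 1) 2 == 0) = !(PySem.Int.mod k 2 == 0) := by
  have h : ∀ m : Int, Int.fmod m 2 = m % 2 := by
    intro m; rw [Int.fmod_eq_emod]; simp
  simp only [PySem.Int.mod, h]
  by_cases hk : k % 2 = 0
  · have h1 : (k + 1) % 2 = 1 := by omega
    simp [hk, h1]
  · have h0 : (k + 1) % 2 = 0 := by omega
    simp [hk, h0]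

theorem pvFoldB (ps : List String) : ∀ (k : Int) (t : Int),
    ((PySem.List.enumerate ps k).foldl
      (fun (total : Int) (p : Int × String) =>
        if PySem.Int.mod p.1 2 == 0 then
          total + (PySem.Str.count p.2 "o" : Int) + (PySem.Str.count p.2 "O" : Int)
        else total)
      t) = t + pvAltSum (PySem.Int.mod k 2 == 0) (ps.map String.toList) := by
  induction ps with
  | nil => intro k t; simp [PySem.List.enumerate, pvAltSum]
  | cons p r ih =>
    intro k t
    rw [PySem.List.enumerate]
    simp only [List.foldl_cons, List.map_cons, pvAltSum]
    rw [ih (k + 1), pvParity]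
    have hco : (PySem.Str.count p "o" : Int) = (p.toList.count 'o' : Int) := by
      rw [show ("o" : String) = String.ofList ['o'] by decide, pvStrCountChar p 'o']
    have hcO : (PySem.Str.count p "O" : Int) = (p.toList.count 'O' : Int) := by
      rw [show ("O" : String) = String.ofList ['O'] by decide, pvStrCountChar p 'O']
    by_cases hk : (PySem.Int.mod k 2 == 0) = true
    · simp only [hk, if_true, Bool.not_true, hco, hcO]
      simp [pvCnt]
      ring
    · simp only [Bool.not_eq_true] at hk
      simp only [hk, Bool.false_eq_true, if_false, Bool.not_false]
      omega

theorem pvCnt_append_singleton (xs : List Char) (c : Char) :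
    pvCnt (xs ++ [c]) = pvCnt xs + pvOC c := by
  simp only [pvCnt, pvOC, List.count_append]
  by_cases ho : c = 'o' <;> by_cases hO : c = 'O' <;>
    simp [ho, hO] <;> omega

theorem pvAltSum_split (l : List Char) : ∀ (cur : List Char) (e : Bool),
    pvAltSum e (pvSplit cur l) = (if e then pvCnt cur.reverse else 0) + pvOutIn (!e) l := by
  induction l with
  | nil => intro cur e; simp [pvSplit, pvAltSum, pvOutIn]
  | cons c r ih =>
    intro cur e
    by_cases hc : c = '"'
    · subst hc
      simp only [pvSplit, if_true, pvAltSum, pvOutIn, Bool.not_not]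
      rw [ih [] (!e)]
      simp [pvCnt]
    · simp only [pvSplit, hc, if_false, pvOutIn]
      rw [ih (c :: cur) e]
      have : (c :: cur).reverse = cur.reverse ++ [c] := by simp
      rw [this, pvCnt_append_singleton]
      cases e
      · simp
      · simp
        ring_nf

theorem pvSplitOn_eq (l : List Char) : PySem.Chars.splitOn l ['"'] = pvSplit [] l := by
  unfold PySem.Chars.splitOn
  rw [pvSplitGo l (l.length + 1) [] [] (by omega)]
  simp

-- ===== VERDICT (by name: the statement is the Claim_ definition above) =====
theorem count_o_outside_quotes_spec : Claim_equal_count_o_outside_quotes := by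
  intro s _
  unfold Spec_count_o_outside_quotes count_o_outside_quotes count_o_outside_quotes_alt
  rw [show (fun (st : Int × Bool) c =>
      if c == '"' then (st.1, !st.2)
      else if PySem.Chars.lowerChar c == 'o' && !st.2 then (st.1 + 1, st.2)
      else st) = pvStepA from rfl, pvFoldA]
  have hsplit : PySem.Str.split? s "\"" =
      some ((pvSplit [] s.toList).map String.ofList) := by
    unfold PySem.Str.split? PySem.Chars.split?
    have : ("\"" : String).toList = ['"'] := rfl
    rw [this]
    simp [pvSplitOn_eq]
  rw [hsplit]
  simp only [Option.getD_some]
  rw [pvFoldB]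
  have hmap : ((pvSplit [] s.toList).map String.ofList).map String.toList
      = pvSplit [] s.toList := by
    simp [List.map_map, Function.comp_def]
  have hk : (PySem.Int.mod 0 2 == 0) = true := by decide
  rw [hmap, hk, pvAltSum_split]
  simp [pvCnt]
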